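-- pv_equiv track=rewrite | github.com/pengke531/finance-opc-kit | workspace/scripts/deploy_profile.py | strip_trailing_commas
-- ===== SOURCE A (Python) =====
-- def strip_trailing_commas(text: str) -> str:
--     result: list[str] = []
--     in_string = False
--     escaped = False
--
--     for ch in text:
--         if in_string:
--             result.append(ch)
--             if escaped:
--                 escaped = False
--             elif ch == "\\":
--                 escaped = True
--             elif ch == '"':
--                 in_string = False
--             continue
--
--         if ch == '"':
--             in_string = True
--             result.append(ch)
--             continue
--
--         if ch in "]}":
--             idx = len(result) - 1
--             while idx >= 0 and result[idx].isspace():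
--                 idx -= 1
--             if idx >= 0 and result[idx] == ",":
--                 del result[idx]
--
--         result.append(ch)
--
--     return "".join(result)
-- ===== SOURCE B (Python) =====
-- def strip_trailing_commas(text: str) -> str:
--     out: list[str] = []
--     last = -1  # index in out of the most recently appended non-whitespace char
--     in_string = False
--     escaped = False
--
--     for ch in text:
--         if in_string:
--             out.append(ch)
--             if escaped:
--                 escaped = False
--             elif ch == "\\":
--                 escaped = True
--             elif ch == '"':
--                 in_string = False
--         else:
--             if ch == '"':
--                 in_string = True
--             elif ch in "]}" and last >= 0 and out[last] == ",":
--                 out[last] = ""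
--             out.append(ch)
--         if not ch.isspace():
--             last = len(out) - 1
--
--     return "".join(out)
-- ===== Notes on version B (the rewrite author's own statement) =====
-- stated objective: alternative
-- what changed: Instead of A's backward scan over the accumulated output (skipping whitespace) at every closing bracket plus a list deletion, B tracks the index of the last non-whitespace character appended and blanks a trailing comma in place, one O(1) step per character; this removes the nested backscan but was not measurably faster on the generated inputs.
import Mathlib
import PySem

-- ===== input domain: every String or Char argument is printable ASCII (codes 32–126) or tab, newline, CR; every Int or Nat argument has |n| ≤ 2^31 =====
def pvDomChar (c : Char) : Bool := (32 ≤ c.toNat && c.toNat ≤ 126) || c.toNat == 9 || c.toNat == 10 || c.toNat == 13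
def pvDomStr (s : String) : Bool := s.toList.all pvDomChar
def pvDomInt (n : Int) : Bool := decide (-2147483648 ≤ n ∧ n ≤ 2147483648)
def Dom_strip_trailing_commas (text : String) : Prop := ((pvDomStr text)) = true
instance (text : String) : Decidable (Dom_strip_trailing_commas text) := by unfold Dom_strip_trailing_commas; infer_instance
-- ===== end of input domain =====

-- B replaces A's backward whitespace scan before each closing bracket with a single pass that
-- remembers the index of the last non-whitespace character and blanks the comma in place.

-- ===== PORT A =====
-- A's inner `while idx >= 0 and result[idx].isspace(): idx -= 1` loop; the call site always
-- has idx < result.length, so the 'x' default of pyGetD is never read.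
def pvBackscan (result : List Char) (idx : Int) : Int :=
  if h : 0 ≤ idx ∧ PySem.Chars.isspace (PySem.List.pyGetD result idx 'x') = true then
    pvBackscan result (idx - 1)
  else idx
termination_by (idx + 1).toNat
decreasing_by omega

-- A's loop body; state = (result, in_string, escaped).
def pvStepA (st : List Char × Bool × Bool) (ch : Char) : List Char × Bool × Bool :=
  let result := st.1
  let in_string := st.2.1
  let escaped := st.2.2
  if in_string then
    let result := result ++ [ch]
    if escaped then (result, in_string, false)
    else if ch = '\\' then (result, in_string, true)
    else if ch = '"' then (result, false, escaped)
    else (result, in_string, escaped)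
  else if ch = '"' then (result ++ [ch], true, escaped)
  else
    let result :=
      if ch = ']' ∨ ch = '}' then
        let idx := pvBackscan result ((result.length : Int) - 1)
        if 0 ≤ idx ∧ PySem.List.pyGetD result idx 'x' = ',' then result.eraseIdx idx.toNat
        else result
      else result
    (result ++ [ch], in_string, escaped)

def strip_trailing_commas (text : String) : String :=
  String.ofList (text.toList.foldl pvStepA ([], false, false)).1

-- ===== PORT B =====
-- B's loop body; state = (out, last, in_string, escaped); out holds 1-char strings and,
-- after a blanked comma, the empty string [].
def pvStepB (st : List (List Char) × Int × Bool × Bool) (ch : Char) : List (List Char) × Int × Bool × Bool :=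
  let out := st.1
  let last := st.2.1
  let in_string := st.2.2.1
  let escaped := st.2.2.2
  let s : List (List Char) × Bool × Bool :=
    if in_string then
      let out := out ++ [[ch]]
      if escaped then (out, in_string, false)
      else if ch = '\\' then (out, in_string, true)
      else if ch = '"' then (out, false, escaped)
      else (out, in_string, escaped)
    else if ch = '"' then (out ++ [[ch]], true, escaped)
    else if (ch = ']' ∨ ch = '}') ∧ 0 ≤ last ∧ PySem.List.pyGetD out last [] = [','] then
      (out.set last.toNat [] ++ [[ch]], in_string, escaped)
    else (out ++ [[ch]], in_string, escaped)
  let last' := if PySem.Chars.isspace ch then last else (s.1.length : Int) - 1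
  (s.1, last', s.2.1, s.2.2)

def strip_trailing_commas_alt (text : String) : String :=
  String.ofList (text.toList.foldl pvStepB ([], -1, false, false)).1.flatten

-- ===== PRECONDITION & SPEC =====
def Spec_strip_trailing_commas (text : String) (out : String) : Prop := out = strip_trailing_commas_alt text
instance (text : String) (out : String) : Decidable (Spec_strip_trailing_commas text out) := by unfold Spec_strip_trailing_commas; infer_instance

-- ===== CLAIM (what is proved, stated in full; the proofs are below) =====
def Claim_equal_strip_trailing_commas : Prop := ∀ (text : String), Dom_strip_trailing_commas text → Spec_strip_trailing_commas text (strip_trailing_commas text)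

-- ===== LEMMAS AND PROOFS =====

-- The simulation invariant between A's `result` and B's `(out, last)`:
-- either nothing non-whitespace has been emitted yet (last = -1 and out is all whitespace),
-- or out splits as u ++ [c] :: trailing-whitespace-singletons with last pointing at the
-- non-whitespace character c and A's result is the concatenation of the pieces.
def pvInv (out : List (List Char)) (last : Int) (res : List Char) : Prop :=
  (last = -1 ∧ out = res.map (fun c => [c]) ∧ ∀ c ∈ res, PySem.Chars.isspace c = true) ∨
  (∃ u c w, last = (u.length : Int) ∧ out = u ++ [c] :: w.map (fun x => [x]) ∧
    res = u.flatten ++ c :: w ∧ PySem.Chars.isspace c = false ∧ ∀ x ∈ w, PySem.Chars.isspace x = true)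

theorem pvFlatten_map_singleton (res : List Char) : (res.map (fun c => [c])).flatten = res := by
  induction res with
  | nil => rfl
  | cons a l ih => simp [ih]

theorem pvInv_flatten {out : List (List Char)} {last : Int} {res : List Char}
    (h : pvInv out last res) : out.flatten = res := by
  rcases h with ⟨_, rfl, _⟩ | ⟨u, c, w, _, rfl, rfl, _, _⟩
  · exact pvFlatten_map_singleton res
  · simp [pvFlatten_map_singleton]

theorem pvGetD_in_range {α : Type} (res : List α) (j : Int) (d : α) (h0 : 0 ≤ j)
    (h1 : j < res.length) : PySem.List.pyGetD res j d = res.getD j.toNat d := by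
  simp [PySem.List.pyGetD, PySem.List.pyGet?, PySem.List.pyIdx?, h0, h1]

theorem pvGetD_mid_self {α : Type} (u : List α) (c : α) (w : List α) (d : α) :
    (u ++ c :: w).getD u.length d = c := by
  induction u with
  | nil => rfl
  | cons a l ih => simp

theorem pvGetD_mid_mem (u : List Char) (c : Char) (w : List Char) :
    ∀ (k : Nat), u.length < k → k < (u ++ c :: w).length → (u ++ c :: w).getD k 'x' ∈ w := by
  induction u with
  | nil =>
    intro k h1 h2
    obtain ⟨k', rfl⟩ : ∃ k', k = k' + 1 := ⟨k - 1, by omega⟩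
    simp only [List.nil_append, List.getD_cons_succ]
    rw [List.getD_eq_getElem w 'x' (by simpa using h2)]
    exact List.getElem_mem _
  | cons a l ih =>
    intro k h1 h2
    obtain ⟨k', rfl⟩ : ∃ k', k = k' + 1 := ⟨k - 1, by omega⟩
    simp only [List.cons_append, List.getD_cons_succ]
    exact ih k' (by simpa using h1) (by simpa using h2)

theorem pvBackscan_allws (res : List Char)
    (hws : ∀ c ∈ res, PySem.Chars.isspace c = true) :
    ∀ (n : Nat) (j : Int), (j + 1).toNat ≤ n → -1 ≤ j → j < res.length →
      pvBackscan res j = -1 := by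
  intro n
  induction n with
  | zero =>
    intro j hn h1 h2
    have : j = -1 := by omega
    subst this
    rw [pvBackscan]; simp
  | succ n ih =>
    intro j hn h1 h2
    rcases eq_or_lt_of_le h1 with he | hlt
    · rw [← he, pvBackscan]; simp
    · have h0 : 0 ≤ j := by omega
      have hmem : res.getD j.toNat 'x' ∈ res := by
        rw [List.getD_eq_getElem res 'x' (by omega)]; exact List.getElem_mem _
      rw [pvBackscan,
        dif_pos ⟨h0, by rw [pvGetD_in_range res j 'x' h0 h2]; exact hws _ hmem⟩]
      exact ih (j - 1) (by omega) (by omega) (by omega)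

theorem pvBackscan_found (u : List Char) (c : Char) (w : List Char)
    (hc : PySem.Chars.isspace c = false) (hw : ∀ x ∈ w, PySem.Chars.isspace x = true) :
    ∀ (n : Nat) (j : Int), (j + 1).toNat ≤ n → (u.length : Int) ≤ j →
      j < (u ++ c :: w).length → pvBackscan (u ++ c :: w) j = u.length := by
  intro n
  induction n with
  | zero => intro j hn h1 h2; omega
  | succ n ih =>
    intro j hn h1 h2
    have h0 : 0 ≤ j := by omega
    rcases eq_or_lt_of_le h1 with he | hlt
    · have hneg : ¬(0 ≤ j ∧ PySem.Chars.isspace (PySem.List.pyGetD (u ++ c :: w) j 'x') = true) := by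
        rw [pvGetD_in_range _ _ _ h0 h2, ← he]
        simp only [Int.toNat_natCast, pvGetD_mid_self, hc]
        simp
      rw [pvBackscan, dif_neg hneg]
      omega
    · have hmem : (u ++ c :: w).getD j.toNat 'x' ∈ w :=
        pvGetD_mid_mem u c w j.toNat (by omega) (by omega)
      rw [pvBackscan,
        dif_pos ⟨h0, by rw [pvGetD_in_range _ _ _ h0 h2]; exact hw _ hmem⟩]
      exact ih (j - 1) (by omega) (by omega) (by omega)

theorem pvErase_mid (u : List Char) (c : Char) (w : List Char) :
    (u ++ c :: w).eraseIdx u.length = u ++ w := by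
  induction u with
  | nil => rfl
  | cons a l ih => simpa using ih

theorem pvSet_mid (u : List (List Char)) (c : List Char) (w : List (List Char)) :
    (u ++ c :: w).set u.length [] = u ++ [] :: w := by
  induction u with
  | nil => rfl
  | cons a l ih => simp [ih]

theorem pvInv_append_ws {out : List (List Char)} {last : Int} {res : List Char} (ch : Char)
    (hch : PySem.Chars.isspace ch = true)
    (h : pvInv out last res) : pvInv (out ++ [[ch]]) last (res ++ [ch]) := by
  rcases h with ⟨hl, rfl, hws⟩ | ⟨u, c, w, hl, rfl, rfl, hc, hw⟩
  · left
    refine ⟨hl, by simp, ?_⟩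
    intro x hx
    rcases List.mem_append.mp hx with hx | hx
    · exact hws x hx
    · simp at hx; subst hx; exact hch
  · right
    refine ⟨u, c, w ++ [ch], hl, by simp, by simp, hc, ?_⟩
    intro x hx
    rcases List.mem_append.mp hx with hx | hx
    · exact hw x hx
    · simp at hx; subst hx; exact hch

theorem pvInv_append_nonws {out : List (List Char)} {res : List Char} (ch : Char)
    (hch : PySem.Chars.isspace ch = false)
    (hflat : out.flatten = res) :
    pvInv (out ++ [[ch]]) ((out.length : Int)) (res ++ [ch]) := by
  right
  exact ⟨out, ch, [], rfl, by simp, by simp [hflat], hch, by simp⟩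

theorem pvStep_inv (res : List Char) (out : List (List Char)) (last : Int)
    (ins esc : Bool) (ch : Char) (h : pvInv out last res) :
    pvInv (pvStepB (out, last, ins, esc) ch).1 (pvStepB (out, last, ins, esc) ch).2.1
        (pvStepA (res, ins, esc) ch).1 ∧
    (pvStepB (out, last, ins, esc) ch).2.2.1 = (pvStepA (res, ins, esc) ch).2.1 ∧
    (pvStepB (out, last, ins, esc) ch).2.2.2 = (pvStepA (res, ins, esc) ch).2.2 := by
  have hwsInv : ∀ hs : PySem.Chars.isspace ch = true,
      pvInv (out ++ [[ch]]) last (res ++ [ch]) := fun hs => pvInv_append_ws ch hs h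
  have hnsInv : ∀ _hs : ¬ PySem.Chars.isspace ch = true,
      pvInv (out ++ [[ch]]) (((out ++ [[ch]]).length : Int) - 1) (res ++ [ch]) := by
    intro hs
    have hns : PySem.Chars.isspace ch = false := by simpa using hs
    have h2 := pvInv_append_nonws ch hns (pvInv_flatten h)
    have hlen : ((out ++ [[ch]]).length : Int) - 1 = (out.length : Int) := by simp
    rw [hlen]; exact h2
  cases ins with
  | true =>
    simp only [pvStepA, pvStepB, if_true]
    split_ifs with h1 h2 h3 h4 h5 h6 h7 <;> refine ⟨?_, rfl, rfl⟩ <;>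
      first
        | exact hwsInv ‹_›
        | exact hnsInv ‹_›
  | false =>
    simp only [pvStepA, pvStepB, Bool.false_eq_true, if_false]
    by_cases hq : ch = '"'
    · subst hq
      rw [if_pos rfl, if_pos rfl]
      have : PySem.Chars.isspace '"' = false := by decide
      rw [if_neg (by simp [this])]
      exact ⟨hnsInv (by simp [this]), rfl, rfl⟩
    · rw [if_neg hq, if_neg hq]
      by_cases hbr : ch = ']' ∨ ch = '}'
      · have hchns : PySem.Chars.isspace ch = false := by
          rcases hbr with rfl | rfl <;> decide
        rw [if_pos hbr]
        rcases h with ⟨hl, rfl, hws⟩ | ⟨u, c, w, hl, hout, hres, hc, hw⟩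
        · -- everything so far is whitespace: A's backscan runs off the front, B's guard sees last = -1
          subst hl
          have hidx : pvBackscan res ((res.length : Int) - 1) = -1 :=
            pvBackscan_allws res hws ((res.length : Int) - 1 + 1).toNat _ (le_refl _)
              (by omega) (by omega)
          rw [hidx]
          rw [if_neg (show ¬((0:Int) ≤ -1 ∧ PySem.List.pyGetD res (-1) 'x' = ',') from
            fun hcon => absurd hcon.1 (by norm_num))]
          rw [if_neg (show ¬((ch = ']' ∨ ch = '}') ∧ (0:Int) ≤ -1 ∧
              PySem.List.pyGetD (res.map fun c => [c]) (-1) [] = [',']) from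
            fun hcon => absurd hcon.2.1 (by norm_num))]
          rw [if_neg (show ¬PySem.Chars.isspace ch = true by simp [hchns])]
          refine ⟨?_, rfl, rfl⟩
          have h2 := pvInv_append_nonws ch hchns (pvFlatten_map_singleton res)
          have hlen : (((res.map fun c => [c]) ++ [[ch]]).length : Int) - 1 =
              ((res.map fun c => [c]).length : Int) := by
            rw [List.length_append]; push_cast; simp
          rw [hlen]; exact h2
        · subst hl hout hres
          have hL : (u.flatten ++ c :: w).length = u.flatten.length + (w.length + 1) := by
            rw [List.length_append, List.length_cons]
          have hBlen : (u ++ [c] :: w.map fun x => [x]).length = u.length + (w.length + 1) := by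
            rw [List.length_append, List.length_cons, List.length_map]
          have hidx : pvBackscan (u.flatten ++ c :: w) (((u.flatten ++ c :: w).length : Int) - 1) =
              u.flatten.length :=
            pvBackscan_found u.flatten c w hc hw
              (((u.flatten ++ c :: w).length : Int) - 1 + 1).toNat _ (le_refl _)
              (by rw [hL]; push_cast; omega) (by rw [hL]; push_cast; omega)
          have hgetA : PySem.List.pyGetD (u.flatten ++ c :: w) (u.flatten.length : Int) 'x' = c := by
            rw [pvGetD_in_range _ _ _ (Int.natCast_nonneg _) (by rw [hL]; push_cast; omega)]
            rw [Int.toNat_natCast]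
            exact pvGetD_mid_self u.flatten c w 'x'
          have hgetB : PySem.List.pyGetD (u ++ [c] :: w.map fun x => [x]) (u.length : Int) [] = [c] := by
            rw [pvGetD_in_range _ _ _ (Int.natCast_nonneg _) (by rw [hBlen]; push_cast; omega)]
            rw [Int.toNat_natCast]
            exact pvGetD_mid_self u [c] (w.map fun x => [x]) []
          rw [hidx]
          by_cases hcomma : c = ','
          · subst hcomma
            rw [if_pos (show (ch = ']' ∨ ch = '}') ∧ (0:Int) ≤ (u.length : Int) ∧
                PySem.List.pyGetD (u ++ [','] :: w.map fun x => [x]) (u.length : Int) [] = [','] from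
              ⟨hbr, Int.natCast_nonneg _, hgetB⟩)]
            rw [if_pos (show (0:Int) ≤ (u.flatten.length : Int) ∧
                PySem.List.pyGetD (u.flatten ++ ',' :: w) (u.flatten.length : Int) 'x' = ',' from
              ⟨Int.natCast_nonneg _, hgetA⟩)]
            rw [if_neg (show ¬PySem.Chars.isspace ch = true by simp [hchns])]
            refine ⟨?_, rfl, rfl⟩
            have hset : (u ++ [','] :: w.map fun x => [x]).set ((u.length : Int)).toNat [] =
                u ++ [] :: w.map fun x => [x] := by
              rw [Int.toNat_natCast]; exact pvSet_mid u [','] (w.map fun x => [x])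
            have herase : (u.flatten ++ ',' :: w).eraseIdx ((u.flatten.length : Int)).toNat =
                u.flatten ++ w := by
              rw [Int.toNat_natCast]; exact pvErase_mid u.flatten ',' w
            rw [hset, herase]
            have hflat : (u ++ [] :: w.map fun x => [x]).flatten = u.flatten ++ w := by
              simp [pvFlatten_map_singleton]
            have h2 := pvInv_append_nonws ch hchns hflat
            have hlen : (((u ++ [] :: w.map fun x => [x]) ++ [[ch]]).length : Int) - 1 =
                ((u ++ [] :: w.map fun x => [x]).length : Int) := by
              rw [List.length_append]; push_cast; simp
            rw [hlen]; exact h2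
          · rw [if_neg (show ¬((ch = ']' ∨ ch = '}') ∧ (0:Int) ≤ (u.length : Int) ∧
                PySem.List.pyGetD (u ++ [c] :: w.map fun x => [x]) (u.length : Int) [] = [',']) from
              fun hcon => hcomma (by
                have h3 := hcon.2.2
                rw [hgetB] at h3
                simpa using h3))]
            rw [if_neg (show ¬((0:Int) ≤ (u.flatten.length : Int) ∧
                PySem.List.pyGetD (u.flatten ++ c :: w) (u.flatten.length : Int) 'x' = ',') from
              fun hcon => hcomma (by
                have h3 := hcon.2
                rw [hgetA] at h3
                exact h3))]
            rw [if_neg (show ¬PySem.Chars.isspace ch = true by simp [hchns])]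
            refine ⟨?_, rfl, rfl⟩
            have hflat : (u ++ [c] :: w.map fun x => [x]).flatten = u.flatten ++ c :: w := by
              simp [pvFlatten_map_singleton]
            have h2 := pvInv_append_nonws ch hchns hflat
            have hlen : (((u ++ [c] :: w.map fun x => [x]) ++ [[ch]]).length : Int) - 1 =
                ((u ++ [c] :: w.map fun x => [x]).length : Int) := by
              rw [List.length_append]; push_cast; simp
            rw [hlen]; exact h2
      · rw [if_neg hbr]
        rw [if_neg (show ¬((ch = ']' ∨ ch = '}') ∧ (0:Int) ≤ last ∧
            PySem.List.pyGetD out last [] = [',']) from fun hcond => hbr hcond.1)]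
        refine ⟨?_, rfl, rfl⟩
        by_cases hs : PySem.Chars.isspace ch = true
        · rw [if_pos hs]; exact pvInv_append_ws ch hs h
        · rw [if_neg hs]; exact hnsInv hs

theorem pvFold_inv (l : List Char) :
    ∀ (res : List Char) (out : List (List Char)) (last : Int) (ins esc : Bool),
      pvInv out last res →
      pvInv (l.foldl pvStepB (out, last, ins, esc)).1 (l.foldl pvStepB (out, last, ins, esc)).2.1
        (l.foldl pvStepA (res, ins, esc)).1 := by
  induction l with
  | nil => intro res out last ins esc h; exact h
  | cons a l ih =>
    intro res out last ins esc h
    obtain ⟨h1, h2, h3⟩ := pvStep_inv res out last ins esc a h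
    simp only [List.foldl_cons]
    have hB : pvStepB (out, last, ins, esc) a =
        ((pvStepB (out, last, ins, esc) a).1, (pvStepB (out, last, ins, esc) a).2.1,
         (pvStepA (res, ins, esc) a).2.1, (pvStepA (res, ins, esc) a).2.2) := by
      rw [← h2, ← h3]
    rw [hB]
    have hA : pvStepA (res, ins, esc) a =
        ((pvStepA (res, ins, esc) a).1, (pvStepA (res, ins, esc) a).2.1,
         (pvStepA (res, ins, esc) a).2.2) := rfl
    rw [hA]
    exact ih _ _ _ _ _ h1

-- ===== VERDICT (by name: the statement is the Claim_ definition above) =====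
theorem strip_trailing_commas_spec : Claim_equal_strip_trailing_commas := by
  intro text _
  unfold Spec_strip_trailing_commas strip_trailing_commas strip_trailing_commas_alt
  have h0 : pvInv ([] : List (List Char)) (-1) ([] : List Char) := by
    left; simp
  have h := pvFold_inv text.toList [] [] (-1) false false h0
  rw [pvInv_flatten h]
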